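-- pv_equiv track=rewrite | github.com/JonasMaes2806/number-games | square.py | solve_pythagorean_gpt
-- ===== SOURCE A (Python) =====
-- import math
--
-- def solve_pythagorean_gpt(upper_z):
--     solutions = []
--     for z in range(1, upper_z + 1):
--         z2 = z * z
--         for x in range(1, z):
--             y2 = z2 - x * x
--             y = int(math.isqrt(y2))
--             if y >= x and y < z and y * y == y2:
--                 solutions.append((x, y, z))
--     return solutions
-- ===== SOURCE B (Python) =====
-- def solve_pythagorean_gpt(upper_z):
--     # Two-pointer search per hypotenuse: no isqrt, one O(z) sweep with lo/hi legs.
--     solutions = []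
--     for z in range(1, upper_z + 1):
--         z2 = z * z
--         lo, hi = 1, z - 1
--         while lo <= hi:
--             s = lo * lo + hi * hi
--             if s == z2:
--                 solutions.append((lo, hi, z))
--                 lo += 1
--                 hi -= 1
--             elif s < z2:
--                 lo += 1
--             else:
--                 hi -= 1
--     return solutions
-- ===== Notes on version B (the rewrite author's own statement) =====
-- stated objective: faster
-- what changed: Replaces the per-x isqrt perfect-square test with a two-pointer sweep (lo from 1 up, hi from z-1 down) per hypotenuse z, finding each x^2+y^2=z^2 pair by comparing the running sum to z^2.
import Mathlib
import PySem

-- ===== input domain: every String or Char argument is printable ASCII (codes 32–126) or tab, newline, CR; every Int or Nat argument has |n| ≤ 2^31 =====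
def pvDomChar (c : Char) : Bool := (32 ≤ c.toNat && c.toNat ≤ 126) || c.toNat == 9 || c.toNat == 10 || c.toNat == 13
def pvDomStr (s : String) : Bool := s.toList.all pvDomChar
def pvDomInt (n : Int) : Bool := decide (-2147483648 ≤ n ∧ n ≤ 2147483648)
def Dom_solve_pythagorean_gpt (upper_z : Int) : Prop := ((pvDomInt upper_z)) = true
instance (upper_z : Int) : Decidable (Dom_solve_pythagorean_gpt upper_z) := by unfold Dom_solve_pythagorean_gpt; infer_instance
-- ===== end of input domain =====

-- B replaces the per-x isqrt perfect-square test with a two-pointer sweep per hypotenuse z (objective: faster, constant factor).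

-- ===== PORT A =====
def solve_pythagorean_gpt (upper_z : Int) : List (List Int) :=
  (PySem.List.pyRange 1 (upper_z + 1) 1).foldl (fun solutions z =>
    let z2 := z * z
    (PySem.List.pyRange 1 z 1).foldl (fun solutions x =>
      let y2 := z2 - x * x
      -- int(math.isqrt(y2)): exact here because y2 ≥ 0 always holds (1 ≤ x < z)
      let y : Int := (Nat.sqrt y2.toNat : Int)
      if y ≥ x ∧ y < z ∧ y * y = y2 then solutions ++ [[x, y, z]] else solutions)
      solutions) []

-- ===== PORT B =====
-- the 'while lo <= hi' two-pointer loop of Source B; 'fuel' only bounds the iteration count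
-- (each step shrinks hi + 1 - lo by at least 1, so fuel = (hi + 1 - lo).toNat suffices)
def pvTwoPtr (fuel : Nat) (z2 z lo hi : Int) (acc : List (List Int)) : List (List Int) :=
  match fuel with
  | 0 => acc
  | fuel + 1 =>
    if lo ≤ hi then
      let s := lo * lo + hi * hi
      if s = z2 then pvTwoPtr fuel z2 z (lo + 1) (hi - 1) (acc ++ [[lo, hi, z]])
      else if s < z2 then pvTwoPtr fuel z2 z (lo + 1) hi acc
      else pvTwoPtr fuel z2 z lo (hi - 1) acc
    else acc

def solve_pythagorean_gpt_alt (upper_z : Int) : List (List Int) :=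
  (PySem.List.pyRange 1 (upper_z + 1) 1).foldl (fun solutions z =>
    pvTwoPtr (z - 1).toNat (z * z) z 1 (z - 1) solutions) []

-- ===== PRECONDITION & SPEC =====
def Spec_solve_pythagorean_gpt (upper_z : Int) (out : List (List Int)) : Prop := out = solve_pythagorean_gpt_alt upper_z
instance (upper_z : Int) (out : List (List Int)) : Decidable (Spec_solve_pythagorean_gpt upper_z out) := by unfold Spec_solve_pythagorean_gpt; infer_instance

-- ===== CLAIM (what is proved, stated in full; the proofs are below) =====
def Claim_equal_solve_pythagorean_gpt : Prop := ∀ (upper_z : Int), Dom_solve_pythagorean_gpt upper_z → Spec_solve_pythagorean_gpt upper_z (solve_pythagorean_gpt upper_z)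

-- ===== LEMMAS AND PROOFS =====

-- canonical list of triples (x, y, z) with lo ≤ x ≤ y ≤ hi and x² + y² = z², in increasing x
def pvS (z lo hi : Int) : List (List Int) :=
  (List.range (hi + 1 - lo).toNat).filterMap (fun i : Nat =>
    let x : Int := lo + (i : Int)
    let y : Int := (Nat.sqrt (z * z - x * x).toNat : Int)
    if x ≤ y ∧ y ≤ hi ∧ y * y = z * z - x * x then some [x, y, z] else none)

theorem pv_sqrt_self (y : Int) (h : 0 ≤ y) : ((y * y).toNat.sqrt : Int) = y := by
  have h1 : (y * y).toNat = y.toNat * y.toNat := by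
    rcases Int.eq_ofNat_of_zero_le h with ⟨n, rfl⟩
    rw [← Nat.cast_mul, Int.toNat_natCast, Int.toNat_natCast]
  rw [h1, ← pow_two, Nat.sqrt_eq']
  exact Int.toNat_of_nonneg h

theorem pvS_nil (z lo hi : Int) (h : hi < lo) : pvS z lo hi = [] := by
  simp [pvS, show (hi + 1 - lo).toNat = 0 by omega]

theorem pvS_cons (z lo hi : Int) (h : lo ≤ hi) :
    pvS z lo hi =
      (if lo ≤ ((z * z - lo * lo).toNat.sqrt : Int) ∧ ((z * z - lo * lo).toNat.sqrt : Int) ≤ hi ∧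
          ((z * z - lo * lo).toNat.sqrt : Int) * ((z * z - lo * lo).toNat.sqrt : Int) = z * z - lo * lo
        then [[lo, ((z * z - lo * lo).toNat.sqrt : Int), z]] else []) ++
      pvS z (lo + 1) hi := by
  have hn : (hi + 1 - lo).toNat = (hi - lo).toNat + 1 := by omega
  have hn2 : (hi + 1 - (lo + 1)).toNat = (hi - lo).toNat := by omega
  rw [pvS, hn, List.range_succ_eq_map, List.filterMap_cons, pvS, hn2, List.filterMap_map]
  have htail : List.filterMap
      ((fun i : Nat =>
        let x : Int := lo + (i : Int)
        let y : Int := (Nat.sqrt (z * z - x * x).toNat : Int)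
        if x ≤ y ∧ y ≤ hi ∧ y * y = z * z - x * x then some [x, y, z] else none) ∘ Nat.succ)
      (List.range (hi - lo).toNat) =
      List.filterMap
      (fun i : Nat =>
        let x : Int := (lo + 1) + (i : Int)
        let y : Int := (Nat.sqrt (z * z - x * x).toNat : Int)
        if x ≤ y ∧ y ≤ hi ∧ y * y = z * z - x * x then some [x, y, z] else none)
      (List.range (hi - lo).toNat) := by
    refine List.filterMap_congr ?_
    intro i _
    have : lo + ((Nat.succ i : Nat) : Int) = (lo + 1) + (i : Int) := by push_cast; ring
    simp only [Function.comp, this]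
  rw [htail]
  simp only [Nat.cast_zero, add_zero]
  split <;> rename_i hc <;> simp_all

theorem pvS_drop_hi (z lo hi : Int)
    (hne : ∀ x : Int, lo ≤ x → x ≤ hi → x * x + hi * hi ≠ z * z) :
    pvS z lo hi = pvS z lo (hi - 1) := by
  by_cases hlh : lo ≤ hi
  · have hn : (hi + 1 - lo).toNat = (hi - lo).toNat + 1 := by omega
    have hn2 : ((hi - 1) + 1 - lo).toNat = (hi - lo).toNat := by omega
    rw [pvS, hn, List.range_succ, List.filterMap_append, pvS, hn2]
    have hx : lo + (((hi - lo).toNat : Nat) : Int) = hi := by omega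
    have hlast : List.filterMap
        (fun i : Nat =>
          let x : Int := lo + (i : Int)
          let y : Int := (Nat.sqrt (z * z - x * x).toNat : Int)
          if x ≤ y ∧ y ≤ hi ∧ y * y = z * z - x * x then some [x, y, z] else none)
        [(hi - lo).toNat] = [] := by
      simp only [List.filterMap_cons, List.filterMap_nil, hx]
      rw [if_neg]
      rintro ⟨h1, h2, h3⟩
      exact hne hi hlh le_rfl (by linarith [le_antisymm h2 h1 ▸ h3])
    rw [hlast, List.append_nil]
    refine List.filterMap_congr ?_
    intro i hmem
    have hilt : (i : Int) < hi - lo := by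
      have := List.mem_range.mp hmem; omega
    simp only []
    refine if_congr ?_ rfl rfl
    constructor
    · rintro ⟨h1, h2, h3⟩
      refine ⟨h1, ?_, h3⟩
      rcases lt_or_eq_of_le h2 with hlt | heq
      · omega
      · exfalso; exact hne (lo + (i : Int)) (by omega) (by omega) (by rw [heq] at h3; linarith)
    · rintro ⟨h1, h2, h3⟩; exact ⟨h1, by omega, h3⟩
  · rw [pvS_nil _ _ _ (by omega), pvS_nil _ _ _ (by omega)]

theorem pvTwoPtr_eq (n : Nat) : ∀ (z lo hi : Int) (acc : List (List Int)),
    (hi + 1 - lo).toNat ≤ n → 1 ≤ lo →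
    pvTwoPtr n (z * z) z lo hi acc = acc ++ pvS z lo hi := by
  induction n with
  | zero =>
    intro z lo hi acc hle h1
    rw [pvTwoPtr, pvS_nil _ _ _ (by omega), List.append_nil]
  | succ n ih =>
    intro z lo hi acc hle h1
    by_cases hlh : lo ≤ hi
    · rw [pvTwoPtr, if_pos hlh]
      simp only []
      by_cases he : lo * lo + hi * hi = z * z
      · rw [if_pos he, ih z (lo + 1) (hi - 1) _ (by omega) (by omega)]
        have hyy : z * z - lo * lo = hi * hi := by linarith
        have hs : (((z * z - lo * lo).toNat.sqrt : Nat) : Int) = hi := by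
          rw [hyy]; exact pv_sqrt_self hi (by omega)
        rw [pvS_cons z lo hi hlh, hs,
          if_pos ⟨by omega, le_rfl, by linarith⟩]
        have hdrop : pvS z (lo + 1) hi = pvS z (lo + 1) (hi - 1) := by
          refine pvS_drop_hi z (lo + 1) hi ?_
          intro x hx1 hx2 hcon
          have hxx : x * x = lo * lo := by linarith
          nlinarith
        rw [hdrop]; simp
      · rw [if_neg he]
        by_cases hlt : lo * lo + hi * hi < z * z
        · rw [if_pos hlt, ih z (lo + 1) hi _ (by omega) (by omega)]
          rw [pvS_cons z lo hi hlh, if_neg ?_, List.nil_append]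
          rintro ⟨h1', h2', h3'⟩
          have hy0 : (0 : Int) ≤ ((z * z - lo * lo).toNat.sqrt : Int) := by positivity
          nlinarith
        · rw [if_neg hlt, ih z lo (hi - 1) _ (by omega) h1]
          rw [pvS_drop_hi z lo hi ?_]
          intro x hx1 hx2 hcon
          have hgt : z * z < lo * lo + hi * hi := lt_of_le_of_ne (not_lt.mp hlt) (fun h => he h.symm)
          nlinarith [mul_le_mul hx1 hx1 (by omega : (0:Int) ≤ lo) (by omega : (0:Int) ≤ x)]
    · rw [pvTwoPtr, if_neg hlh, pvS_nil _ _ _ (by omega), List.append_nil]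

theorem pv_filterMap_if {α β : Type} (l : List α) (p : α → Prop) [DecidablePred p] (f : α → β) :
    l.filterMap (fun a => if p a then some (f a) else none)
      = (l.filter (fun a => decide (p a))).map f := by
  induction l with
  | nil => rfl
  | cons a t ih =>
    simp only [List.filterMap_cons, List.filter_cons]
    split_ifs with h h2 h3 <;> simp_all

theorem pv_inner_eq (z : Int) (acc : List (List Int)) :
    (PySem.List.pyRange 1 z 1).foldl (fun solutions x =>
      let y2 := z * z - x * x
      let y : Int := (Nat.sqrt y2.toNat : Int)
      if y ≥ x ∧ y < z ∧ y * y = y2 then solutions ++ [[x, y, z]] else solutions) acc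
    = acc ++ pvS z 1 (z - 1) := by
  have hfun : (fun (solutions : List (List Int)) (x : Int) =>
      let y2 := z * z - x * x
      let y : Int := (Nat.sqrt y2.toNat : Int)
      if y ≥ x ∧ y < z ∧ y * y = y2 then solutions ++ [[x, y, z]] else solutions)
      = (fun (solutions : List (List Int)) (x : Int) =>
      if ((Nat.sqrt (z * z - x * x).toNat : Int) ≥ x ∧ (Nat.sqrt (z * z - x * x).toNat : Int) < z ∧
          (Nat.sqrt (z * z - x * x).toNat : Int) * (Nat.sqrt (z * z - x * x).toNat : Int) = z * z - x * x)
        then solutions ++ [[x, (Nat.sqrt (z * z - x * x).toNat : Int), z]] else solutions) := rfl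
  rw [hfun, PySem.List.foldl_append_ite
    (fun x : Int => (Nat.sqrt (z * z - x * x).toNat : Int) ≥ x ∧ (Nat.sqrt (z * z - x * x).toNat : Int) < z ∧
      (Nat.sqrt (z * z - x * x).toNat : Int) * (Nat.sqrt (z * z - x * x).toNat : Int) = z * z - x * x)
    (fun x : Int => [x, (Nat.sqrt (z * z - x * x).toNat : Int), z])]
  congr 1
  rw [PySem.List.pyRange_one, List.filter_map, List.map_map, pvS,
    show (z - 1 + 1 - 1 : Int) = z - 1 by ring, pv_filterMap_if]
  rw [List.filter_congr (q := fun i : Nat =>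
        decide ((1 + (i : Int)) ≤ (Nat.sqrt (z * z - (1 + (i : Int)) * (1 + (i : Int))).toNat : Int) ∧
          (Nat.sqrt (z * z - (1 + (i : Int)) * (1 + (i : Int))).toNat : Int) ≤ z - 1 ∧
          (Nat.sqrt (z * z - (1 + (i : Int)) * (1 + (i : Int))).toNat : Int) *
            (Nat.sqrt (z * z - (1 + (i : Int)) * (1 + (i : Int))).toNat : Int)
            = z * z - (1 + (i : Int)) * (1 + (i : Int))) ) ?_]
  · rfl
  · intro i _
    simp only [Function.comp, decide_eq_decide, ge_iff_le]
    constructor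
    · rintro ⟨h1, h2, h3⟩; exact ⟨h1, by omega, h3⟩
    · rintro ⟨h1, h2, h3⟩; exact ⟨h1, by omega, h3⟩

-- ===== VERDICT (by name: the statement is the Claim_ definition above) =====
theorem solve_pythagorean_gpt_spec : Claim_equal_solve_pythagorean_gpt := by
  intro u _
  show _ = _
  unfold solve_pythagorean_gpt solve_pythagorean_gpt_alt
  refine PySem.List.foldl_congr_mem _ _ _ _ ?_
  intro acc z _
  exact (pv_inner_eq z acc).trans
    (pvTwoPtr_eq (z - 1).toNat z 1 (z - 1) acc (by omega) (by omega)).symm
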